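-- pv_equiv track=rewrite | github.com/trihoang0809/fall22-comp140 | spotit.py | create_cards
-- ===== SOURCE A (Python) =====
-- def incident(point, line, mod):
--     """
--     Determines if a point lies on a line in the projective
--     geometric space in the finite field with the given modulus.
--
--     The inputs point and line must be valid within the finite field
--     with the given modulus.
--
--     inputs:
--         - point: a tuple of 3 integers representing a point
--         - line: a tuple of 3 integers representing a line
--         - mod: an integer representing the modulus
--
--     returns: a boolean indicating whether or not the point lies on the line
--     """
--     point_on_line = False
--     if (point[0] * line[0] + point[1] * line[1] + point[2] * line[2]) % mod == 0:
--         point_on_line = True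
--     return point_on_line
--
-- def create_cards(points, lines, mod):
--     """
--     Create a list of unique cards.
--
--     Each point and line within the inputs, points and lines, must be
--     valid within the finite field with the given modulus.
--
--     inputs:
--         - points: a list of unique points, each represented as a tuple of 3 integers
--         - lines: a list of unique lines, each represented as a tuple of 3 integers
--         - mod: an integer representing the modulus
--
--     returns: a list of lists of integers, where each nested list represents a card.
--     """
--     deck = []
--     length = len(points)
--     for line in lines:
--         valid = []
--         for pointidx in range(length):
--             point = points[pointidx]
--             if incident(point, line, mod):
--                 valid.append(pointidx)
--         deck.append(valid)
--     return deck
-- ===== SOURCE B (Python) =====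
-- def create_cards(points, lines, mod):
--     # Staged computation: for each line, accumulate the full dot-product
--     # vector coordinate-by-coordinate into a mutable array (three sweeps),
--     # then filter the indices by divisibility in a separate pass.
--     n = len(points)
--     deck = []
--     for line in lines:
--         dots = [0] * n
--         for k in range(3):
--             for i in range(n):
--                 dots[i] += points[i][k] * line[k]
--         deck.append([i for i in range(n) if dots[i] % mod == 0])
--     return deck
-- ===== Notes on version B (the rewrite author's own statement) =====
-- stated objective: alternative
-- what changed: B drops the per-point incidence predicate: for each line it builds the whole dot-product vector in three coordinate-major sweeps over a mutable accumulator array and then selects the indices divisible by mod in a separate filtering pass.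
import Mathlib
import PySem

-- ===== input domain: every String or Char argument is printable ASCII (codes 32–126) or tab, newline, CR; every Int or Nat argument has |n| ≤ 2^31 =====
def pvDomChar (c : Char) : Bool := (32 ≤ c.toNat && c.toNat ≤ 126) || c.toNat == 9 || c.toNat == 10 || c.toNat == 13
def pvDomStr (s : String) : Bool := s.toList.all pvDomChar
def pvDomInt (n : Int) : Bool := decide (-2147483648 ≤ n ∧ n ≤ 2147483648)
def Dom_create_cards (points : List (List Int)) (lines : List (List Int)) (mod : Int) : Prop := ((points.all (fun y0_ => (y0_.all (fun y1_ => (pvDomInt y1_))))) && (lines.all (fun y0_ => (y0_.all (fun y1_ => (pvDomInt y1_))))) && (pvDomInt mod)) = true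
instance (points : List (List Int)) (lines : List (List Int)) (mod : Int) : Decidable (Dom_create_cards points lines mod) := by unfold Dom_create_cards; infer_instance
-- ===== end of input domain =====

-- B replaces A's per-point incidence predicate by a staged computation per line:
-- three coordinate-major sweeps accumulate the dot-product vector in a mutable
-- array, then a separate pass filters the indices (objective: alternative, same cost).

-- ===== PORT A =====
-- module helper `incident` (used by A only)
def pvIncident (point line : List Int) (m : Int) : Bool :=
  let point_on_line := false
  if PySem.Int.mod (PySem.List.pyGetD point 0 0 * PySem.List.pyGetD line 0 0
      + PySem.List.pyGetD point 1 0 * PySem.List.pyGetD line 1 0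
      + PySem.List.pyGetD point 2 0 * PySem.List.pyGetD line 2 0) m == 0 then true
  else point_on_line

def create_cards (points : List (List Int)) (lines : List (List Int)) (mod : Int) : List (List Int) :=
  let length : Int := points.length
  lines.foldl (fun deck line =>
    deck ++ [(PySem.List.pyRange 0 length 1).foldl (fun valid pointidx =>
      let point := PySem.List.pyGetD points pointidx []
      if pvIncident point line mod then valid ++ [pointidx] else valid) []]) []

-- ===== PORT B =====
def create_cards_alt (points : List (List Int)) (lines : List (List Int)) (mod : Int) : List (List Int) :=
  let n : Int := points.length
  lines.foldl (fun deck line =>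
    -- dots = [0] * n; dots[i] += points[i][k] * line[k]  (indices 0 ≤ i < n are in range, so pySetD/pyGetD are exact)
    let dots := (PySem.List.pyRange 0 3 1).foldl (fun dots k =>
        (PySem.List.pyRange 0 n 1).foldl (fun dots i =>
          PySem.List.pySetD dots i (PySem.List.pyGetD dots i 0 +
            PySem.List.pyGetD (PySem.List.pyGetD points i []) k 0 * PySem.List.pyGetD line k 0)) dots)
      (PySem.List.pyRepeat [0] n)
    deck ++ [(PySem.List.pyRange 0 n 1).filter
      (fun i => PySem.Int.mod (PySem.List.pyGetD dots i 0) mod == 0)]) []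

-- ===== PRECONDITION & SPEC =====
-- Pre_ excludes exactly the inputs where A raises: with nonempty points and lines,
-- mod = 0 is a ZeroDivisionError and a point/line of length < 3 an IndexError.
def Pre_create_cards (points : List (List Int)) (lines : List (List Int)) (mod : Int) : Prop :=
  points = [] ∨ lines = [] ∨
    (mod ≠ 0 ∧ (∀ p ∈ points, 3 ≤ p.length) ∧ (∀ l ∈ lines, 3 ≤ l.length))
instance (points : List (List Int)) (lines : List (List Int)) (mod : Int) : Decidable (Pre_create_cards points lines mod) := by unfold Pre_create_cards; infer_instance

def pvWitness_create_cards : List (List Int) × List (List Int) × Int :=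
  ([[1, 0, 0], [0, 1, 0]], [[0, 0, 1], [1, 1, 0]], 2)

def Spec_create_cards (points : List (List Int)) (lines : List (List Int)) (mod : Int) (out : List (List Int)) : Prop := out = create_cards_alt points lines mod
instance (points : List (List Int)) (lines : List (List Int)) (mod : Int) (out : List (List Int)) : Decidable (Spec_create_cards points lines mod out) := by unfold Spec_create_cards; infer_instance

-- ===== CLAIM (what is proved, stated in full; the proofs are below) =====
def Claim_equal_create_cards : Prop := ∀ (points : List (List Int)) (lines : List (List Int)) (mod : Int), Dom_create_cards points lines mod → Pre_create_cards points lines mod → Spec_create_cards points lines mod (create_cards points lines mod)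

-- ===== LEMMAS AND PROOFS =====

-- one in-place sweep `for i in range(b): dots[i] += g(i)` (proof helper)
def pvSweep (points : List (List Int)) (line : List Int) (k : Int) (d : List Int) : List Int :=
  (PySem.List.pyRange 0 (points.length : Int) 1).foldl (fun dots i =>
    PySem.List.pySetD dots i (PySem.List.pyGetD dots i 0 +
      PySem.List.pyGetD (PySem.List.pyGetD points i []) k 0 * PySem.List.pyGetD line k 0)) d

theorem pv_sweep_len (g : Int → Int) (b : Nat) (d0 : List Int) :
    ((PySem.List.pyRange 0 (b : Int) 1).foldl
      (fun d i => PySem.List.pySetD d i (PySem.List.pyGetD d i 0 + g i)) d0).length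
      = d0.length := by
  induction b generalizing d0 with
  | zero => simp
  | succ b ih =>
    have h : ((b + 1 : Nat) : Int) = (b : Int) + 1 := by push_cast; ring
    rw [h, PySem.List.pyRange_one_succ_right (by positivity), List.foldl_append]
    simp [ih]

theorem pv_sweep_get (g : Int → Int) (b : Nat) (d0 : List Int) (hb : b ≤ d0.length) (m : Nat) :
    PySem.List.pyGetD ((PySem.List.pyRange 0 (b : Int) 1).foldl
      (fun d i => PySem.List.pySetD d i (PySem.List.pyGetD d i 0 + g i)) d0) (m : Int) 0
      = PySem.List.pyGetD d0 (m : Int) 0 + (if m < b then g (m : Int) else 0) := by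
  induction b generalizing m with
  | zero => simp
  | succ b ih =>
    have h : ((b + 1 : Nat) : Int) = (b : Int) + 1 := by push_cast; ring
    rw [h, PySem.List.pyRange_one_succ_right (by positivity), List.foldl_append]
    simp only [List.foldl_cons, List.foldl_nil]
    have hblen : b < ((PySem.List.pyRange 0 (b : Int) 1).foldl
        (fun d i => PySem.List.pySetD d i (PySem.List.pyGetD d i 0 + g i)) d0).length := by
      rw [pv_sweep_len]; omega
    rw [PySem.List.pyGetD_pySetD_natCast _ b m _ _ hblen]
    by_cases hm : m = b
    · subst hm
      rw [if_pos rfl, ih (by omega) m]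
      simp
    · rw [if_neg hm, ih (by omega) m]
      have : (m < b) ↔ (m < b + 1) := by omega
      simp only [this]

theorem pvSweep_len (points : List (List Int)) (line : List Int) (k : Int) (d : List Int) :
    (pvSweep points line k d).length = d.length :=
  pv_sweep_len _ points.length d

theorem pvSweep_get (points : List (List Int)) (line : List Int) (k : Int) (d : List Int)
    (hb : points.length ≤ d.length) (m : Nat) :
    PySem.List.pyGetD (pvSweep points line k d) (m : Int) 0
      = PySem.List.pyGetD d (m : Int) 0 + (if m < points.length then
          PySem.List.pyGetD (PySem.List.pyGetD points (m : Int) []) k 0 * PySem.List.pyGetD line k 0 else 0) :=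
  pv_sweep_get _ points.length d hb m

-- the three staged sweeps give every in-range entry the A-side dot product
theorem pv_dots_get (points : List (List Int)) (line : List Int) (i : Int)
    (h0 : 0 ≤ i) (h1 : i < (points.length : Int)) :
    PySem.List.pyGetD ((PySem.List.pyRange 0 3 1).foldl (fun dots k =>
        (PySem.List.pyRange 0 (points.length : Int) 1).foldl (fun dots i =>
          PySem.List.pySetD dots i (PySem.List.pyGetD dots i 0 +
            PySem.List.pyGetD (PySem.List.pyGetD points i []) k 0 * PySem.List.pyGetD line k 0)) dots)
      (PySem.List.pyRepeat [0] (points.length : Int))) i 0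
    = PySem.List.pyGetD (PySem.List.pyGetD points i []) 0 0 * PySem.List.pyGetD line 0 0
      + PySem.List.pyGetD (PySem.List.pyGetD points i []) 1 0 * PySem.List.pyGetD line 1 0
      + PySem.List.pyGetD (PySem.List.pyGetD points i []) 2 0 * PySem.List.pyGetD line 2 0 := by
  obtain ⟨j, rfl, hj⟩ : ∃ j : Nat, i = (j : Int) ∧ j < points.length :=
    ⟨i.toNat, by omega, by omega⟩
  have hr3 : PySem.List.pyRange 0 3 1 = [0, 1, 2] := by decide
  have hrep : PySem.List.pyRepeat [0] ((points.length : Nat) : Int)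
      = List.replicate points.length (0 : Int) := by
    rw [PySem.List.pyRepeat_singleton]; simp
  rw [hr3, hrep]
  simp only [List.foldl_cons, List.foldl_nil]
  show PySem.List.pyGetD (pvSweep points line 2 (pvSweep points line 1 (pvSweep points line 0
      (List.replicate points.length (0 : Int))))) (j : Int) 0 = _
  rw [pvSweep_get _ _ _ _ (by rw [pvSweep_len, pvSweep_len]; simp) j,
      pvSweep_get _ _ _ _ (by rw [pvSweep_len]; simp) j,
      pvSweep_get _ _ _ _ (by simp) j]
  simp only [if_pos hj]
  have hz : PySem.List.pyGetD (List.replicate points.length (0 : Int)) (j : Int) 0 = 0 := by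
    rw [PySem.List.pyGetD_of_nonneg _ _ (by positivity)]
    simp [hj]
  rw [hz]; ring

-- ===== VERDICT (by name: the statement is the Claim_ definition above) =====
theorem create_cards_spec : Claim_equal_create_cards := by
  intro points lines m _ _
  unfold Spec_create_cards create_cards create_cards_alt
  rw [PySem.List.foldl_append_singleton_eq_map, PySem.List.foldl_append_singleton_eq_map]
  simp only [List.nil_append]
  refine List.map_congr_left (fun line _ => ?_)
  rw [PySem.List.foldl_append_if]
  simp only [List.nil_append, List.map_id']
  refine (List.filter_congr (fun i hi => ?_)).symm
  rw [PySem.List.mem_pyRange_one] at hi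
  rw [pv_dots_get points line i hi.1 hi.2]
  rw [Bool.eq_iff_iff]
  simp [pvIncident]
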